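-- pv_equiv track=rewrite | github.com/kaTrek0406/meta_news_bot | scripts/resummarize_missing.py | _clean_points
-- ===== SOURCE A (Python) =====
-- from typing import List, Dict, Any
--
-- STOP_PREFIXES = (
--     "×",
--     "Skip to",
--     "Table of Contents",
--     "News",
--     "Back to Newsroom",
--     "Help Center",
--     "Conversations 2025",
-- )
--
-- def _clean_points(lines: List[str]) -> List[str]:
--     out: List[str] = []
--     seen = set()
--     for p in lines or []:
--         p = (p or "").strip()
--         if not p:
--             continue
--         low = p.lower()
--         if low.startswith(tuple(s.lower() for s in STOP_PREFIXES)):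
--             continue
--         if low in seen:
--             continue
--         seen.add(low)
--         out.append(p)
--     return out[:5]
-- ===== SOURCE B (Python) =====
-- from typing import List
--
-- STOP_PREFIXES = (
--     "×",
--     "Skip to",
--     "Table of Contents",
--     "News",
--     "Back to Newsroom",
--     "Help Center",
--     "Conversations 2025",
-- )
--
-- def _clean_points(lines: List[str]) -> List[str]:
--     # Recursive take-k-distinct: emit the head, delete every later line sharing its
--     # lowercased key, recurse with the budget decremented -- no seen-set, no slicing,
--     # the cap of 5 bounds the recursion depth.
--     def take_distinct(xs: List[str], k: int) -> List[str]:
--         if k == 0 or not xs: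
--             return []
--         head = xs[0]
--         key = head.lower()
--         return [head] + take_distinct([q for q in xs[1:] if q.lower() != key], k - 1)
--
--     lows = tuple(s.lower() for s in STOP_PREFIXES)
--     cand = [q for q in ((p or "").strip() for p in (lines or []))
--             if q and not q.lower().startswith(lows)]
--     return take_distinct(cand, 5)
-- ===== Notes on version B (the rewrite author's own statement) =====
-- stated objective: alternative
-- what changed: A's single stateful loop with a mutable seen-set and a final [:5] slice is replaced by a candidate-list comprehension plus a genuinely different dedup: a recursive take-5-distinct that emits the head, deletes all later lines with the same lowercased key, and decrements the budget -- no set, no accumulator, no slicing.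
import Mathlib
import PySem

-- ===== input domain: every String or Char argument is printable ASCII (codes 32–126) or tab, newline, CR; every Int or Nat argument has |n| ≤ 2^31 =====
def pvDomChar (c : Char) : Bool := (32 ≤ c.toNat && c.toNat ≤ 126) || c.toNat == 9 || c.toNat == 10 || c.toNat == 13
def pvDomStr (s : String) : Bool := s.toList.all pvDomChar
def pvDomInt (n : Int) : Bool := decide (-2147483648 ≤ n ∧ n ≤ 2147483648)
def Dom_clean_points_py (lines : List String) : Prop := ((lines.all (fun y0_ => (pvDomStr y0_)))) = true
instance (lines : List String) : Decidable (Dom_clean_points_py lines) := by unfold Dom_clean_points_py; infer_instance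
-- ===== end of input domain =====

-- B replaces A's stateful seen-set loop (and final [:5] slice) by a candidate list plus a
-- recursive take-5-distinct that deletes later occurrences of each head's lowercased key;
-- objective: alternative algorithm.

def pyStopPrefixes : List String :=
  ["×", "Skip to", "Table of Contents", "News", "Back to Newsroom", "Help Center",
   "Conversations 2025"]

-- ===== PORT A =====
-- loop body of A's single fused for-loop: state is (out, seen)
def pvStepA (st : List String × PySem.Set String) (p : String) : List String × PySem.Set String :=
  let p := PySem.Str.strip p
  if p = "" then st
  else
    let low := PySem.Str.lower p
    if (pyStopPrefixes.map PySem.Str.lower).any (fun s => PySem.Str.startswith low s) then st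
    else if PySem.Set.contains st.2 low then st
    else (st.1 ++ [p], PySem.Set.add st.2 low)

def clean_points_py (lines : List String) : List String :=
  (lines.foldl pvStepA ([], PySem.Set.empty)).1.take 5

-- ===== PORT B =====
-- B's candidate predicate (nonempty and not starting with a lowered stop prefix)
def pvKeep (lows : List String) (q : String) : Bool :=
  q ≠ "" && !(lows.any (fun s => PySem.Str.startswith (PySem.Str.lower q) s))

-- B's recursive take-k-distinct: emit the head, delete later lines with the same
-- lowercased key, recurse with the budget decremented
def pvTakeDistinct : Nat → List String → List String
  | 0, _ => []
  | _ + 1, [] => []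
  | k + 1, x :: xs =>
    x :: pvTakeDistinct k (xs.filter (fun q => PySem.Str.lower q ≠ PySem.Str.lower x))
termination_by _ l => l.length
decreasing_by
  simp
  exact (List.length_filter_le _ _).trans (by simp)

def clean_points_py_alt (lines : List String) : List String :=
  let lows := pyStopPrefixes.map PySem.Str.lower
  let cand := (lines.map PySem.Str.strip).filter (pvKeep lows)
  pvTakeDistinct 5 cand

-- ===== PRECONDITION & SPEC =====
def Spec_clean_points_py (lines : List String) (out : List String) : Prop := out = clean_points_py_alt lines
instance (lines : List String) (out : List String) : Decidable (Spec_clean_points_py lines out) := by unfold Spec_clean_points_py; infer_instance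

-- ===== CLAIM (what is proved, stated in full; the proofs are below) =====
def Claim_equal_clean_points_py : Prop := ∀ (lines : List String), Dom_clean_points_py lines → Spec_clean_points_py lines (clean_points_py lines)

-- ===== LEMMAS AND PROOFS =====

-- proof-side: the uncapped recursive dedup (delete later occurrences of the head's key)
def pvDedup : List String → List String
  | [] => []
  | x :: xs => x :: pvDedup (xs.filter (fun q => PySem.Str.lower q ≠ PySem.Str.lower x))
termination_by l => l.length
decreasing_by
  simp
  exact (List.length_filter_le _ _).trans (by simp)

-- proof-side intermediate: A's dedup as a recursion carrying the seen set explicitly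
def pvDedupSeen (seen : PySem.Set String) : List String → List String
  | [] => []
  | x :: xs =>
    if PySem.Set.contains seen (PySem.Str.lower x) then pvDedupSeen seen xs
    else x :: pvDedupSeen (PySem.Set.add seen (PySem.Str.lower x)) xs

-- A's fused fold emits exactly out ++ pvDedupSeen seen (candidate list)
theorem foldA_eq_dedupSeen (lines : List String) :
    ∀ (out : List String) (seen : PySem.Set String),
    (lines.foldl pvStepA (out, seen)).1
      = out ++ pvDedupSeen seen
          ((lines.map PySem.Str.strip).filter (pvKeep (pyStopPrefixes.map PySem.Str.lower))) := by
  induction lines with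
  | nil => intro out seen; simp [pvDedupSeen]
  | cons p rest ih =>
    intro out seen
    simp only [List.map_cons, List.foldl_cons, List.filter_cons]
    by_cases hk : pvKeep (pyStopPrefixes.map PySem.Str.lower) (PySem.Str.strip p) = true
    · have hne : PySem.Str.strip p ≠ "" := by
        intro h; rw [pvKeep, h] at hk; simp at hk
      have hns : ((pyStopPrefixes.map PySem.Str.lower).any
          (fun s => PySem.Str.startswith (PySem.Str.lower (PySem.Str.strip p)) s)) = false := by
        rw [pvKeep] at hk
        cases h : ((pyStopPrefixes.map PySem.Str.lower).any
          (fun s => PySem.Str.startswith (PySem.Str.lower (PySem.Str.strip p)) s))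
        · rfl
        · rw [h] at hk; simp at hk
      rw [if_pos hk]
      by_cases hc : PySem.Set.contains seen (PySem.Str.lower (PySem.Str.strip p)) = true
      · have hA : pvStepA (out, seen) p = (out, seen) := by
          have hm := (PySem.Set.contains_iff seen _).mp hc
          simp only [pvStepA, hns]; rw [if_neg hne]; simp [hm]
        rw [hA, ih, pvDedupSeen, if_pos hc]
      · have hA : pvStepA (out, seen) p
            = (out ++ [PySem.Str.strip p],
               PySem.Set.add seen (PySem.Str.lower (PySem.Str.strip p))) := by
          have hm : PySem.Str.lower (PySem.Str.strip p) ∉ seen :=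
            fun h => hc ((PySem.Set.contains_iff seen _).mpr h)
          simp only [pvStepA, hns]; rw [if_neg hne]
          simp [hm]
        rw [hA, ih, pvDedupSeen, if_neg hc, List.append_assoc]
        rfl
    · rw [if_neg hk]
      have hA : pvStepA (out, seen) p = (out, seen) := by
        simp only [pvStepA]
        by_cases h1 : PySem.Str.strip p = ""
        · rw [if_pos h1]
        · have : ((pyStopPrefixes.map PySem.Str.lower).any
              (fun s => PySem.Str.startswith (PySem.Str.lower (PySem.Str.strip p)) s)) = true := by
            rw [pvKeep] at hk
            cases h : ((pyStopPrefixes.map PySem.Str.lower).any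
              (fun s => PySem.Str.startswith (PySem.Str.lower (PySem.Str.strip p)) s))
            · rw [h] at hk; simp [h1] at hk
            · rfl
          rw [if_neg h1, this]; simp
      rw [hA]; exact ih out seen
  
-- unfold lemma for the well-founded pvDedup
theorem pvDedup_cons (x : String) (xs : List String) :
    pvDedup (x :: xs)
      = x :: pvDedup (xs.filter (fun q => PySem.Str.lower q ≠ PySem.Str.lower x)) := by
  rw [pvDedup]

-- pvDedupSeen seen is pvDedup after filtering out the already-seen keys
theorem dedupSeen_eq_dedup :
    ∀ (n : Nat) (xs : List String), xs.length ≤ n → ∀ (seen : PySem.Set String),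
    pvDedupSeen seen xs
      = pvDedup (xs.filter (fun q => !(PySem.Set.contains seen (PySem.Str.lower q)))) := by
  intro n
  induction n with
  | zero =>
    intro xs h seen
    have : xs = [] := List.eq_nil_of_length_eq_zero (Nat.le_zero.mp h)
    subst this; simp [pvDedupSeen, pvDedup]
  | succ m ih =>
    intro xs h seen
    cases xs with
    | nil => simp [pvDedupSeen, pvDedup]
    | cons x xs =>
      have hlen : xs.length ≤ m := Nat.lt_succ_iff.mp (by simpa using h)
      rw [List.filter_cons]
      by_cases hc : PySem.Set.contains seen (PySem.Str.lower x) = true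
      · rw [pvDedupSeen, if_pos hc]
        simp only [hc, Bool.not_true, Bool.false_eq_true, reduceIte]
        exact ih xs hlen seen
      · rw [pvDedupSeen, if_neg hc]
        have hcb : (!(PySem.Set.contains seen (PySem.Str.lower x))) = true := by
          cases hcc : PySem.Set.contains seen (PySem.Str.lower x)
          · rfl
          · exact absurd hcc hc
        rw [if_pos hcb, pvDedup_cons, List.filter_filter]
        have hfeq : ∀ q : String,
            ((!(PySem.Set.contains (PySem.Set.add seen (PySem.Str.lower x)) (PySem.Str.lower q))) : Bool)
              = (decide (PySem.Str.lower q ≠ PySem.Str.lower x)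
                  && !(PySem.Set.contains seen (PySem.Str.lower q))) := by
          intro q
          by_cases h1 : PySem.Str.lower q = PySem.Str.lower x <;>
            by_cases h2 : PySem.Str.lower q ∈ seen <;>
            simp [PySem.Set.mem_add, h1, h2]
        rw [List.filter_congr (fun q _ => (hfeq q).symm)]
        rw [ih xs hlen (PySem.Set.add seen (PySem.Str.lower x))]

-- taking k of the uncapped dedup is the budgeted take-k-distinct
theorem take_dedup :
    ∀ (n : Nat) (xs : List String), xs.length ≤ n → ∀ (k : Nat),
    (pvDedup xs).take k = pvTakeDistinct k xs := by
  intro n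
  induction n with
  | zero =>
    intro xs h k
    have : xs = [] := List.eq_nil_of_length_eq_zero (Nat.le_zero.mp h)
    subst this
    cases k <;> simp [pvDedup, pvTakeDistinct]
  | succ m ih =>
    intro xs h k
    cases xs with
    | nil => cases k <;> simp [pvDedup, pvTakeDistinct]
    | cons x xs =>
      have hlen : xs.length ≤ m := Nat.lt_succ_iff.mp (by simpa using h)
      cases k with
      | zero => simp [pvTakeDistinct]
      | succ k =>
        rw [pvDedup_cons, pvTakeDistinct, List.take_succ_cons]
        congr 1
        exact ih _ ((List.length_filter_le _ _).trans hlen) k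

-- ===== VERDICT (by name: the statement is the Claim_ definition above) =====
theorem clean_points_py_spec : Claim_equal_clean_points_py := by
  intro lines _
  unfold Spec_clean_points_py clean_points_py clean_points_py_alt
  rw [foldA_eq_dedupSeen, dedupSeen_eq_dedup (List.length _) _ (le_refl _)]
  simp only [List.nil_append]
  have hfe : (((lines.map PySem.Str.strip).filter
        (pvKeep (pyStopPrefixes.map PySem.Str.lower))).filter
        (fun q => !(PySem.Set.contains PySem.Set.empty (PySem.Str.lower q))))
      = (lines.map PySem.Str.strip).filter (pvKeep (pyStopPrefixes.map PySem.Str.lower)) := by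
    apply List.filter_eq_self.mpr
    intro a _
    simp [PySem.Set.empty]
  rw [hfe, take_dedup (List.length _) _ (le_refl _)]
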